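-- pv_equiv track=rewrite | github.com/NyeongB/python_2 | coding/coding_29.py | solution
-- ===== SOURCE A (Python) =====
-- def solution(table, languages, preference):
--     answer = ''
--
--     total = []
--
--     for s in table:
--         temp = s.split(' ')
--         sum = 0
--         hs = {}
--         for idx, t in enumerate(temp):
--             hs[t] = idx
--
--
--         for l, p in zip(languages, preference):
--             if hs.get(l) != None:
--                 sum += (6 - hs.get(l)) * p
--
--         total.append((temp[0], sum))
--
--     total.sort(key=lambda x:x[1],reverse=True)
--
--     # 점수가같으면 이름
--     max = 0
--     for i in total:
--         if max < i[1]: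
--             max = i[1]
--     last = []
--     for i in total:
--         if max == i[1]:
--             last.append(i)
--
--     last.sort()
--
--     answer = last[0][0]
--
--     return answer
-- ===== SOURCE B (Python) =====
-- def solution(table, languages, preference):
--     best = None  # (name, score) of the current leader
--     for row in table:
--         toks = row.split(' ')
--         pos = {t: i for i, t in enumerate(toks)}
--         score = sum((6 - pos[l]) * p for l, p in zip(languages, preference) if l in pos)
--         name = toks[0]
--         if best is None or score > best[1] or (score == best[1] and name < best[0]):
--             best = (name, score)
--     return best[0]
-- ===== Notes on version B (the rewrite author's own statement) =====
-- stated objective: simpler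
-- what changed: B keeps the per-row scoring but replaces A's collect-into-a-list, descending sort, max pass, filter pass and lexicographic sort with one streaming pass that keeps the current best (max score, then lexicographically smallest name); Pre_ excludes exactly the inputs on which A raises IndexError (no row scores >= 0, because A floors its max at 0), where B either raises too (empty table) or naturally returns the best-scoring row's name.
import Mathlib
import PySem

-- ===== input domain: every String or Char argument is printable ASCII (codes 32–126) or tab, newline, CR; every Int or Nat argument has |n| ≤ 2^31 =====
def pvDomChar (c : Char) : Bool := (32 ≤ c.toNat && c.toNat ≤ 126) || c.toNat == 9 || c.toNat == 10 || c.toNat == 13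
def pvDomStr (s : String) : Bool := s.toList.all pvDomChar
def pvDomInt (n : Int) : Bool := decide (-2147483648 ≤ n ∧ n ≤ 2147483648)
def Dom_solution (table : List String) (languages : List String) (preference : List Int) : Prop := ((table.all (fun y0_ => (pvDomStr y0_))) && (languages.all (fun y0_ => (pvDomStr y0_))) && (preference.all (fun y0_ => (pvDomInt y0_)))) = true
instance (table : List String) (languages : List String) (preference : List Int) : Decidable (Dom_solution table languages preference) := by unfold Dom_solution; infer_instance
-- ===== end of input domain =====

-- B replaces A's collect-list + two sorts + max/filter passes by one streaming best-so-far pass (objective: simpler).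

-- ===== PORT A =====
def solution (table : List String) (languages : List String) (preference : List Int) : String :=
  let total : List (String × Int) :=
    table.foldl (fun total s =>
      -- s.split(' '): the separator is the nonempty literal " ", so split? is always some; getD totalizes
      let temp : List String := (PySem.Str.split? s " ").getD []
      let hs : PySem.Dict String Int :=
        (PySem.List.enumerate temp).foldl (fun hs it => hs.insert it.2 it.1) PySem.Dict.empty
      let sum : Int :=
        (languages.zip preference).foldl (fun sum lp =>
          match hs.get? lp.1 with
          | some i => sum + (6 - i) * lp.2
          | none => sum) 0
      -- temp[0] never raises (split of any string is nonempty); last[0] below raises iff last = [], excluded by Pre_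
      total ++ [((PySem.List.pyGet? temp 0).getD "", sum)]) []
  let total2 := PySem.List.sorted total (fun x => x.2) true
  let mx : Int := total2.foldl (fun mx i => if mx < i.2 then i.2 else mx) 0
  let last : List (String × Int) :=
    total2.foldl (fun last i => if mx == i.2 then last ++ [i] else last) []
  let last2 := PySem.List.sorted2 last (fun x => x.1) (fun x => x.2)
  ((PySem.List.pyGet? last2 0).map (fun x => x.1)).getD ""

-- ===== PORT B =====
def solution_alt (table : List String) (languages : List String) (preference : List Int) : String :=
  let best : Option (String × Int) :=
    table.foldl (fun best row =>
      let toks : List String := (PySem.Str.split? row " ").getD []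
      let pos : PySem.Dict String Int :=
        (PySem.List.enumerate toks).foldl (fun d it => d.insert it.2 it.1) PySem.Dict.empty
      let score : Int :=
        (languages.zip preference).foldl (fun sc lp =>
          if pos.contains lp.1 then sc + (6 - (pos.get? lp.1).getD 0) * lp.2 else sc) 0
      let name : String := (PySem.List.pyGet? toks 0).getD ""
      match best with
      | none => some (name, score)
      | some b =>
        if decide (b.2 < score) || (decide (score = b.2) && decide (name < b.1)) then
          some (name, score)
        else best) none
  -- best[0]: raises (TypeError) iff best is still None, i.e. table = [], excluded by Pre_
  (best.map (fun b => b.1)).getD ""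

-- ===== PRECONDITION & SPEC =====
-- the weighted preference score of one row (used by Pre_ to say exactly when A returns at all)
def rowScore (languages : List String) (preference : List Int) (s : String) : Int :=
  let temp : List String := (PySem.Str.split? s " ").getD []
  let hs : PySem.Dict String Int :=
    (PySem.List.enumerate temp).foldl (fun d it => d.insert it.2 it.1) PySem.Dict.empty
  (languages.zip preference).foldl (fun sum lp =>
    match hs.get? lp.1 with
    | some i => sum + (6 - i) * lp.2
    | none => sum) 0

-- A raises IndexError (last[0] on an empty list) exactly when no row scores ≥ 0, because A floors
-- its running max at 0; this includes the empty table, where B raises too.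
def Pre_solution (table : List String) (languages : List String) (preference : List Int) : Prop :=
  ∃ s ∈ table, 0 ≤ rowScore languages preference s
instance (table : List String) (languages : List String) (preference : List Int) : Decidable (Pre_solution table languages preference) := by unfold Pre_solution; infer_instance

def pvWitness_solution : List String × List String × List Int := (["jm python 3", "ab java 1"], ["python", "java"], [5, 3])

def Spec_solution (table : List String) (languages : List String) (preference : List Int) (out : String) : Prop := out = solution_alt table languages preference
instance (table : List String) (languages : List String) (preference : List Int) (out : String) : Decidable (Spec_solution table languages preference out) := by unfold Spec_solution; infer_instance

-- ===== CLAIM (what is proved, stated in full; the proofs are below) =====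
def Claim_equal_solution : Prop := ∀ (table : List String) (languages : List String) (preference : List Int), Dom_solution table languages preference → Pre_solution table languages preference → Spec_solution table languages preference (solution table languages preference)


-- ===== LEMMAS AND PROOFS =====

-- abstractions of the two programs' per-row computations
def rowName (s : String) : String :=
  (PySem.List.pyGet? ((PySem.Str.split? s " ").getD []) 0).getD ""

def rowPair (languages : List String) (preference : List Int) (s : String) : String × Int :=
  (rowName s, rowScore languages preference s)

-- B's fold step over an already-scored row
def step (best : Option (String × Int)) (q : String × Int) : Option (String × Int) :=
  match best with
  | none => some q
  | some b =>
    if decide (b.2 < q.2) || (decide (q.2 = b.2) && decide (q.1 < b.1)) then some q else best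

-- A's running-max loop
def mxFold (ps : List (String × Int)) : Int :=
  ps.foldl (fun m i => if m < i.2 then i.2 else m) 0

lemma pyGet?_cons_zero {α : Type} (x : α) (xs : List α) : PySem.List.pyGet? (x :: xs) 0 = some x := by
  simp [PySem.List.pyGet?, PySem.List.pyIdx?]

-- A's 'hs.get(l) != None' match and B's 'l in pos' guard compute the same contribution
lemma inner_fn_eq (d : PySem.Dict String Int) :
    (fun (sc : Int) (lp : String × Int) =>
      if d.contains lp.1 then sc + (6 - (d.get? lp.1).getD 0) * lp.2 else sc)
    = (fun sc lp => match d.get? lp.1 with | some i => sc + (6 - i) * lp.2 | none => sc) := by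
  funext sc lp
  rw [PySem.Dict.contains_eq_isSome_get?]
  cases h : d.get? lp.1 <;> simp

lemma body_eq (languages : List String) (preference : List Int) :
    (fun (best : Option (String × Int)) (row : String) =>
      let toks : List String := (PySem.Str.split? row " ").getD []
      let pos : PySem.Dict String Int :=
        (PySem.List.enumerate toks).foldl (fun d it => d.insert it.2 it.1) PySem.Dict.empty
      let score : Int :=
        (languages.zip preference).foldl (fun sc lp =>
          if pos.contains lp.1 then sc + (6 - (pos.get? lp.1).getD 0) * lp.2 else sc) 0
      let name : String := (PySem.List.pyGet? toks 0).getD ""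
      match best with
      | none => some (name, score)
      | some b =>
        if decide (b.2 < score) || (decide (score = b.2) && decide (name < b.1)) then
          some (name, score)
        else best)
    = (fun best row => step best (rowPair languages preference row)) := by
  funext best row
  show _ = step best (rowPair languages preference row)
  unfold step rowPair rowName rowScore
  simp only [inner_fn_eq]

lemma alt_eq (table languages : List String) (preference : List Int) :
    solution_alt table languages preference
    = (((table.map (rowPair languages preference)).foldl step none).map (fun b => b.1)).getD "" := by
  unfold solution_alt
  rw [body_eq, List.foldl_map]

lemma a_eq (table languages : List String) (preference : List Int) :
    solution table languages preference
    = ((PySem.List.pyGet?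
          (PySem.List.sorted2
            ((PySem.List.sorted (table.map (rowPair languages preference)) (fun x => x.2) true).filter
              (fun i => mxFold (PySem.List.sorted (table.map (rowPair languages preference)) (fun x => x.2) true) == i.2))
            (fun x => x.1) (fun x => x.2)) 0).map (fun x => x.1)).getD "" := by
  unfold solution
  simp only [PySem.List.foldl_append_singleton_eq_map, List.nil_append,
    PySem.List.foldl_append_if, List.map_id']
  rfl

lemma mxFold_append (ps : List (String × Int)) (q : String × Int) :
    mxFold (ps ++ [q]) = if mxFold ps < q.2 then q.2 else mxFold ps := by
  simp [mxFold, List.foldl_append]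

lemma mxFold_ub (ps : List (String × Int)) : ∀ q ∈ ps, q.2 ≤ mxFold ps := by
  induction ps using List.reverseRecOn with
  | nil => simp
  | append_singleton ps q ih =>
    intro r hr
    rw [mxFold_append]
    rcases List.mem_append.1 hr with h | h
    · have := ih r h; split <;> omega
    · simp at h; subst h; split <;> omega

lemma mxFold_mem (ps : List (String × Int)) : mxFold ps = 0 ∨ ∃ q ∈ ps, q.2 = mxFold ps := by
  induction ps using List.reverseRecOn with
  | nil => left; simp [mxFold]
  | append_singleton ps q ih =>
    rw [mxFold_append]
    split
    · right; exact ⟨q, by simp, rfl⟩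
    · rcases ih with h | ⟨r, hr, h⟩
      · left; exact h
      · right; exact ⟨r, by simp [hr], h⟩

-- the invariant of B's streaming pass: the accumulator is none only on the empty prefix, and
-- otherwise holds the best (max score, then lexicographically least name) row so far
lemma step_inv (ps : List (String × Int)) :
    (ps.foldl step none = none → ps = []) ∧
    (∀ b, ps.foldl step none = some b →
      b ∈ ps ∧ (∀ q ∈ ps, q.2 ≤ b.2) ∧ (∀ q ∈ ps, q.2 = b.2 → b.1 ≤ q.1)) := by
  induction ps using List.reverseRecOn with
  | nil => simp
  | append_singleton ps q ih =>
    rw [List.foldl_append]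
    obtain ⟨ihn, ihs⟩ := ih
    cases hr : ps.foldl step none with
    | none =>
      have hnil := ihn hr
      subst hnil
      simp only [List.foldl_cons, List.foldl_nil, step]
      constructor
      · intro h; simp at h
      · intro b hb
        obtain rfl : q = b := by simpa using hb
        refine ⟨by simp, ?_, ?_⟩
        · intro r hr'; simp at hr'; subst hr'; omega
        · intro r hr' _; simp at hr'; subst hr'; exact le_refl _
    | some b =>
      obtain ⟨hmem, hub, htie⟩ := ihs b hr
      simp only [List.foldl_cons, List.foldl_nil, step]
      by_cases hc : (decide (b.2 < q.2) || (decide (q.2 = b.2) && decide (q.1 < b.1))) = true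
      · rw [if_pos hc]
        simp only [Bool.or_eq_true, Bool.and_eq_true, decide_eq_true_eq] at hc
        constructor
        · intro h; simp at h
        · intro c hc'
          obtain rfl : q = c := by simpa using hc'
          refine ⟨by simp, ?_, ?_⟩
          · intro r hr'
            rcases List.mem_append.1 hr' with h | h
            · have := hub r h
              rcases hc with h' | ⟨h', _⟩ <;> omega
            · simp at h; subst h; omega
          · intro r hr' hrq
            rcases List.mem_append.1 hr' with h | h
            · rcases hc with h' | ⟨h', hname⟩
              · have := hub r h; omega
              · have := htie r h (by omega)
                calc q.1 ≤ b.1 := le_of_lt hname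
                  _ ≤ r.1 := this
            · simp at h; subst h; exact le_refl _
      · rw [if_neg hc]
        constructor
        · intro h; simp at h
        · intro c hc'
          obtain rfl : b = c := by simpa using hc'
          refine ⟨List.mem_append.2 (Or.inl hmem), ?_, ?_⟩
          · intro r hr'
            rcases List.mem_append.1 hr' with h | h
            · exact hub r h
            · have hq : r = q := by simpa using h
              rw [hq]
              by_contra hlt
              have hbq : b.2 < q.2 := lt_of_not_ge hlt
              apply hc
              simp [hbq]
          · intro r hr' hrb
            rcases List.mem_append.1 hr' with h | h
            · exact htie r h hrb
            · have hq : r = q := by simpa using h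
              rw [hq] at hrb ⊢
              by_contra hlt
              have hname : q.1 < b.1 := lt_of_not_ge hlt
              apply hc
              simp [hrb, hname]

lemma insertBy_congr {α : Type} (f g : α → α → Bool) (x : α) (ys : List α)
    (h : ∀ y ∈ ys, f x y = g x y) :
    PySem.List.insertBy f x ys = PySem.List.insertBy g x ys := by
  induction ys with
  | nil => rfl
  | cons y ys ih =>
    simp only [PySem.List.insertBy]
    rw [h y (by simp)]
    split
    · rfl
    · rw [ih (fun z hz => h z (by simp [hz]))]

lemma foldl_insertBy_congr {α : Type} (f g : α → α → Bool) (S : List α)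
    (hfg : ∀ a ∈ S, ∀ b ∈ S, f a b = g a b) :
    ∀ (xs acc : List α), (∀ a ∈ xs, a ∈ S) → (∀ a ∈ acc, a ∈ S) →
      xs.foldl (fun acc x => PySem.List.insertBy f x acc) acc
      = xs.foldl (fun acc x => PySem.List.insertBy g x acc) acc := by
  intro xs
  induction xs with
  | nil => intros; rfl
  | cons x xs ih =>
    intro acc hxs hacc
    simp only [List.foldl_cons]
    rw [insertBy_congr f g x acc (fun y hy => hfg x (hxs x (by simp)) y (hacc y hy))]
    exact ih _ (fun a ha => hxs a (by simp [ha]))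
      (fun a ha => by
        rcases (PySem.List.mem_insertBy g x a acc).1 ha with h | h
        · subst h; exact hxs a (by simp)
        · exact hacc a h)

-- on a list whose second components are all equal, Python's lexicographic tuple sort is a sort by first component
lemma sorted2_eq_sorted_fst (xs : List (String × Int)) (c : Int) (h : ∀ q ∈ xs, q.2 = c) :
    PySem.List.sorted2 xs (fun x => x.1) (fun x => x.2)
    = PySem.List.sorted xs (fun x => x.1) false := by
  show xs.foldl (fun acc x => PySem.List.insertBy _ x acc) []
     = xs.foldl (fun acc x => PySem.List.insertBy _ x acc) []
  apply foldl_insertBy_congr _ _ xs _ xs [] (fun a ha => ha) (by simp)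
  intro a ha b hb
  have ha2 := h a ha
  have hb2 := h b hb
  simp [ha2, hb2]

-- ===== VERDICT (by name: the statement is the Claim_ definition above) =====
theorem solution_spec : Claim_equal_solution := by
  intro table languages preference _hdom hpre
  unfold Spec_solution
  rw [a_eq, alt_eq]
  set pairs := table.map (rowPair languages preference) with hpairs
  set SL := PySem.List.sorted pairs (fun x => x.2) true with hSL
  set M := mxFold SL with hM
  obtain ⟨s, hs, hs0⟩ := hpre
  have hq1 : rowPair languages preference s ∈ pairs := List.mem_map_of_mem hs
  have hq1' : rowPair languages preference s ∈ SL :=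
    (PySem.List.mem_sorted pairs (fun x => x.2) true _).2 hq1
  have hq1pos : (0:Int) ≤ (rowPair languages preference s).2 := hs0
  have hach : ∃ q ∈ SL, q.2 = M := by
    rcases mxFold_mem SL with h0 | h
    · refine ⟨_, hq1', ?_⟩
      have := mxFold_ub SL _ hq1'
      omega
    · exact h
  obtain ⟨q0, hq0SL, hq0M⟩ := hach
  set last := SL.filter (fun i => M == i.2) with hlast
  have hlast_all : ∀ r ∈ last, r.2 = M := by
    intro r hr
    exact (eq_of_beq (List.mem_filter.1 hr).2).symm
  rw [sorted2_eq_sorted_fst last M hlast_all]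
  have hlast_ne : last ≠ [] :=
    List.ne_nil_of_mem (List.mem_filter.2 ⟨hq0SL, by simp [hq0M]⟩)
  cases hsort : PySem.List.sorted last (fun x => x.1) false with
  | nil => exact absurd ((PySem.List.sorted_eq_nil_iff last (fun x => x.1) false).1 hsort) hlast_ne
  | cons m tl =>
    rw [pyGet?_cons_zero]
    have hmem_last : m ∈ last :=
      (PySem.List.mem_sorted last (fun x => x.1) false _).1 (hsort ▸ List.mem_cons_self)
    have hmMin : ∀ y ∈ last, m.1 ≤ y.1 :=
      PySem.List.key_head_sorted_le last (fun x => x.1) hsort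
    have hm_pairs : m ∈ pairs :=
      (PySem.List.mem_sorted pairs (fun x => x.2) true _).1 (List.mem_filter.1 hmem_last).1
    have hmM : m.2 = M := hlast_all m hmem_last
    cases hB : pairs.foldl step none with
    | none =>
      exfalso
      have hnil := (step_inv pairs).1 hB
      rw [hnil] at hq1
      simp at hq1
    | some b =>
      obtain ⟨hbmem, hbub, hbtie⟩ := (step_inv pairs).2 b hB
      simp only [Option.map_some, Option.getD_some]
      have hbM : b.2 = M := by
        have h1 : b.2 ≤ M :=
          mxFold_ub SL b ((PySem.List.mem_sorted pairs (fun x => x.2) true _).2 hbmem)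
        have h2 : M ≤ b.2 := by
          rcases mxFold_mem SL with h0 | ⟨r, hrSL, hr⟩
          · have := hbub _ hq1; omega
          · have := hbub r ((PySem.List.mem_sorted pairs (fun x => x.2) true _).1 hrSL)
            omega
        omega
      have h1 : m.1 ≤ b.1 :=
        hmMin b (List.mem_filter.2
          ⟨(PySem.List.mem_sorted pairs (fun x => x.2) true _).2 hbmem, by simp [hbM]⟩)
      have h2 : b.1 ≤ m.1 := hbtie m hm_pairs (by omega)
      exact le_antisymm h1 h2
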